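-- pv_equiv track=rewrite | github.com/rdupart/mitr-take-home-eval | mechanistic_mitr_experiment.py | negate_question
-- ===== SOURCE A (Python) =====
-- _AUX = [
--     ("is ", "is not "),
--     ("are ", "are not "),
--     ("was ", "was not "),
--     ("were ", "were not "),
--     ("does ", "does not "),
--     ("do ", "do not "),
--     ("did ", "did not "),
--     ("has ", "has not "),
--     ("have ", "have not "),
--     ("had ", "had not "),
--     ("can ", "cannot "),
--     ("could ", "could not "),
--     ("will ", "will not "),
--     ("would ", "would not "),
--     ("should ", "should not "),
-- ]
--
-- def negate_question(q: str):
--     q = q.strip().rstrip("?").lower()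
--     for pos, neg in _AUX:
--         if q.startswith(neg):
--             return pos + q[len(neg) :]
--         if q.startswith(pos):
--             return neg + q[len(pos) :]
--     return None
-- ===== SOURCE B (Python) =====
-- # B: partition the question at its first space into head/rest, then negate by
-- # editing around the head word: "cannot"->"can", "can"->"cannot", and for the
-- # 14 regular aux verbs remove a leading "not " from the rest or insert one.
-- # No (pos, neg) pair table and no scan over candidate prefixes.
-- _REGULAR = {
--     "is", "are", "was", "were", "does", "do", "did",
--     "has", "have", "had", "could", "will", "would", "should",
-- }
--
--
-- def negate_question(q: str):
--     q = q.strip().rstrip("?").lower()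
--     head, sep, rest = q.partition(" ")
--     if not sep:
--         return None
--     if head == "cannot":
--         return "can " + rest
--     if head == "can":
--         return "cannot " + rest
--     if head not in _REGULAR:
--         return None
--     if rest.startswith("not "):
--         return head + " " + rest[4:]
--     return head + " not " + rest
-- ===== Notes on version B (the rewrite author's own statement) =====
-- stated objective: alternative
-- what changed: Instead of scanning a 15-entry (pos,neg) prefix-pair table with startswith, B partitions the question at its first space and rewrites around the head word: cannot<->can directly, and for the 14 regular aux verbs it removes or inserts the negation word at the front of the remainder, driven by a set membership test.
import Mathlib
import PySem

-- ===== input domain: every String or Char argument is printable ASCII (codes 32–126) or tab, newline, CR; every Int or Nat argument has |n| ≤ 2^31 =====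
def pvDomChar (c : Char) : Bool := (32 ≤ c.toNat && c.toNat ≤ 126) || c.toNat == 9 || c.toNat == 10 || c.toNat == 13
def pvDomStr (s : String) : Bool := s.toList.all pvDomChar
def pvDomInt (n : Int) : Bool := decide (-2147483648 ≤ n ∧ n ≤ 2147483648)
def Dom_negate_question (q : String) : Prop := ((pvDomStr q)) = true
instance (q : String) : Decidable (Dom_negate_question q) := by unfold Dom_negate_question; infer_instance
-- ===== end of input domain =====

-- B replaces A's scan over 15 (pos, neg) prefix pairs by partitioning at the first space and
-- editing around the head word (negation-word removal/insertion, cannot<->can) (objective: alternative).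

-- ===== PORT A =====
-- A's module constant _AUX
def pvAux : List (List Char × List Char) := [
  ("is ".toList, "is not ".toList),
  ("are ".toList, "are not ".toList),
  ("was ".toList, "was not ".toList),
  ("were ".toList, "were not ".toList),
  ("does ".toList, "does not ".toList),
  ("do ".toList, "do not ".toList),
  ("did ".toList, "did not ".toList),
  ("has ".toList, "has not ".toList),
  ("have ".toList, "have not ".toList),
  ("had ".toList, "had not ".toList),
  ("can ".toList, "cannot ".toList),
  ("could ".toList, "could not ".toList),
  ("will ".toList, "will not ".toList),
  ("would ".toList, "would not ".toList),
  ("should ".toList, "should not ".toList)]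

-- q.strip().rstrip("?").lower() — identical first line of both Pythons.
-- rstrip("?") has no PySem primitive: exact hand port (drop trailing '?' characters).
def pvRstripQ (cs : List Char) : List Char := (cs.reverse.dropWhile (· == '?')).reverse

def pvPrep (q : String) : List Char :=
  PySem.Chars.lower (pvRstripQ (PySem.Chars.strip q.toList))

-- A's for-loop over _AUX: neg test first, then pos, else next entry
def pvNegateLoop (s : List Char) : List (List Char × List Char) → Option (List Char)
  | [] => none
  | (pos, neg) :: rest =>
    if PySem.Chars.startswith s neg then some (pos ++ PySem.Chars.slice s (some (neg.length : Int)) none)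
    else if PySem.Chars.startswith s pos then some (neg ++ PySem.Chars.slice s (some (pos.length : Int)) none)
    else pvNegateLoop s rest

def negate_question (q : String) : Option String :=
  (pvNegateLoop (pvPrep q) pvAux).map String.ofList

-- ===== PORT B =====
-- B's module constant _REGULAR (a Python set of the 14 regular aux verbs)
def pvRegular : PySem.Set (List Char) := PySem.Set.ofList [
  "is".toList, "are".toList, "was".toList, "were".toList, "does".toList, "do".toList,
  "did".toList, "has".toList, "have".toList, "had".toList, "could".toList,
  "will".toList, "would".toList, "should".toList]

-- body of B after the shared preprocessing line.
-- q.partition(" ") has no PySem primitive: exact hand port for the one-char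
-- separator — head is everything before the first space; the separator is
-- present exactly when the head is shorter than the whole string.
def pvPartitionCore (s : List Char) : Option (List Char) :=
  let head := s.takeWhile (fun c => c ≠ ' ')
  if head.length = s.length then none
  else
    let rest := s.drop (head.length + 1)
    if head = "cannot".toList then some ("can ".toList ++ rest)
    else if head = "can".toList then some ("cannot ".toList ++ rest)
    else if ¬ (PySem.Set.contains pvRegular head = true) then none
    else if PySem.Chars.startswith rest "not ".toList then
      some (head ++ " ".toList ++ PySem.Chars.slice rest (some 4) none)
    else some (head ++ " not ".toList ++ rest)

def negate_question_alt (q : String) : Option String :=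
  (pvPartitionCore (pvPrep q)).map String.ofList

-- ===== PRECONDITION & SPEC =====
def Spec_negate_question (q : String) (out : Option String) : Prop := out = negate_question_alt q
instance (q : String) (out : Option String) : Decidable (Spec_negate_question q out) := by unfold Spec_negate_question; infer_instance

-- ===== CLAIM (what is proved, stated in full; the proofs are below) =====
def Claim_equal_negate_question : Prop := ∀ (q : String), Dom_negate_question q → Spec_negate_question q (negate_question q)

-- ===== LEMMAS AND PROOFS =====

-- two space-free first words followed by a space, one prefixing the other, are equal
theorem pvFirstWord (u : List Char) : ∀ (v w r : List Char), ' ' ∉ u → ' ' ∉ v →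
    ((v ++ ' ' :: w) <+: (u ++ ' ' :: r)) → v = u := by
  induction u with
  | nil =>
    intro v w r _ hv h
    cases v with
    | nil => rfl
    | cons x v' =>
      exfalso
      rw [List.cons_append, List.nil_append, List.cons_prefix_cons] at h
      exact hv (h.1 ▸ List.mem_cons_self ..)
  | cons a u' ih =>
    intro v w r hu hv h
    cases v with
    | nil =>
      exfalso
      rw [List.nil_append, List.cons_append, List.cons_prefix_cons] at h
      exact hu (h.1 ▸ List.mem_cons_self ..)
    | cons x v' =>
      rw [List.cons_append, List.cons_append, List.cons_prefix_cons] at h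
      have := ih v' w r (fun hm => hu (List.mem_cons_of_mem _ hm)) (fun hm => hv (List.mem_cons_of_mem _ hm)) h.2
      rw [h.1, this]

theorem pvSwFalse (u r v w : List Char) (hu : ' ' ∉ u) (hv : ' ' ∉ v) (hne : v ≠ u) :
    PySem.Chars.startswith (u ++ ' ' :: r) (v ++ ' ' :: w) = false := by
  cases hb : PySem.Chars.startswith (u ++ ' ' :: r) (v ++ ' ' :: w) with
  | false => rfl
  | true => exact absurd (pvFirstWord u v w r hu hv ((PySem.Chars.startswith_iff _ _).mp hb)) hne

theorem pvLoopNone (s : List Char) : ∀ l : List (List Char × List Char),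
    (∀ pn ∈ l, PySem.Chars.startswith s pn.1 = false ∧ PySem.Chars.startswith s pn.2 = false) →
    pvNegateLoop s l = none := by
  intro l
  induction l with
  | nil => intro _; rfl
  | cons pn rest ih =>
    intro h
    obtain ⟨h1, h2⟩ := h pn (List.mem_cons_self ..)
    simp only [pvNegateLoop, h1, h2, Bool.false_eq_true, if_false]
    exact ih fun x hx => h x (List.mem_cons_of_mem _ hx)

-- split off everything before the first space
theorem pvSplitFirst (s : List Char) (hs : ' ' ∈ s) : ∃ u r, s = u ++ ' ' :: r ∧ ' ' ∉ u := by
  induction s with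
  | nil => simp at hs
  | cons a t ih =>
    by_cases ha : a = ' '
    · exact ⟨[], t, by simp [ha], by simp⟩
    · obtain ⟨u, r, ht, hu⟩ := ih (by
        rcases List.mem_cons.mp hs with h | h
        · exact absurd h.symm ha
        · exact h)
      exact ⟨a :: u, r, by simp [ht], by simp [hu]; exact fun h => ha h.symm⟩

-- B's partition: the head is the space-free first word
theorem pvHeadTake (u : List Char) (r : List Char) (hu : ' ' ∉ u) :
    (u ++ ' ' :: r).takeWhile (fun c => c ≠ ' ') = u := by
  induction u with
  | nil => simp
  | cons a u' ih =>
    have ha : a ≠ ' ' := fun h => hu (h ▸ List.mem_cons_self ..)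
    simp only [List.cons_append, List.takeWhile_cons, decide_eq_true_eq]
    rw [if_pos ha, ih (fun hm => hu (List.mem_cons_of_mem _ hm))]

theorem pvDropRest (u r : List Char) : (u ++ ' ' :: r).drop (u.length + 1) = r := by
  have h : u ++ ' ' :: r = (u ++ [' ']) ++ r := by simp
  rw [h, show u.length + 1 = (u ++ [' ']).length by simp, List.drop_left]

-- B's body on a split string, with the partition evaluated away
theorem pvPartitionSplit (u r : List Char) (hu : ' ' ∉ u) :
    pvPartitionCore (u ++ ' ' :: r) =
    (if u = "cannot".toList then some ("can ".toList ++ r)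
     else if u = "can".toList then some ("cannot ".toList ++ r)
     else if ¬ (PySem.Set.contains pvRegular u = true) then none
     else if PySem.Chars.startswith r "not ".toList then
       some (u ++ " ".toList ++ PySem.Chars.slice r (some 4) none)
     else some (u ++ " not ".toList ++ r)) := by
  have hlen : ¬ (u.length = (u ++ ' ' :: r).length) := by simp
  unfold pvPartitionCore
  simp only [pvHeadTake u r hu, hlen, if_false, pvDropRest]

-- the central fact: A's scan and B's partition-and-edit agree on every preprocessed string
theorem pvCore (s : List Char) : pvNegateLoop s pvAux = pvPartitionCore s := by
  by_cases hsp : ' ' ∈ s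
  case neg =>
    have hsw : ∀ p : List Char, ' ' ∈ p → PySem.Chars.startswith s p = false := by
      intro p hp
      cases hb : PySem.Chars.startswith s p with
      | false => rfl
      | true => exact absurd (((PySem.Chars.startswith_iff _ _).mp hb).subset hp) hsp
    rw [pvLoopNone s pvAux (by intro pn hpn; fin_cases hpn <;> exact ⟨hsw _ (by decide), hsw _ (by decide)⟩)]
    have htw : s.takeWhile (fun c => c ≠ ' ') = s :=
      List.takeWhile_eq_self_iff.mpr (by intro x hx; simp only [decide_eq_true_eq]; exact fun h => hsp (h ▸ hx))
    unfold pvPartitionCore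
    rw [htw]
    simp
  case pos =>
  obtain ⟨u, r, rfl, hu⟩ := pvSplitFirst s hsp
  rw [pvPartitionSplit u r hu]
  by_cases h1 : u = "is".toList
  · subst h1
    simp [pvNegateLoop, pvAux, PySem.Chars.startswith, List.isPrefixOf, PySem.List.slice_from, pvRegular]
  by_cases h2 : u = "are".toList
  · subst h2
    simp [pvNegateLoop, pvAux, PySem.Chars.startswith, List.isPrefixOf, PySem.List.slice_from, pvRegular]
  by_cases h3 : u = "was".toList
  · subst h3
    simp [pvNegateLoop, pvAux, PySem.Chars.startswith, List.isPrefixOf, PySem.List.slice_from, pvRegular]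
  by_cases h4 : u = "were".toList
  · subst h4
    simp [pvNegateLoop, pvAux, PySem.Chars.startswith, List.isPrefixOf, PySem.List.slice_from, pvRegular]
  by_cases h5 : u = "does".toList
  · subst h5
    simp [pvNegateLoop, pvAux, PySem.Chars.startswith, List.isPrefixOf, PySem.List.slice_from, pvRegular]
  by_cases h6 : u = "do".toList
  · subst h6
    simp [pvNegateLoop, pvAux, PySem.Chars.startswith, List.isPrefixOf, PySem.List.slice_from, pvRegular]
  by_cases h7 : u = "did".toList
  · subst h7
    simp [pvNegateLoop, pvAux, PySem.Chars.startswith, List.isPrefixOf, PySem.List.slice_from, pvRegular]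
  by_cases h8 : u = "has".toList
  · subst h8
    simp [pvNegateLoop, pvAux, PySem.Chars.startswith, List.isPrefixOf, PySem.List.slice_from, pvRegular]
  by_cases h9 : u = "have".toList
  · subst h9
    simp [pvNegateLoop, pvAux, PySem.Chars.startswith, List.isPrefixOf, PySem.List.slice_from, pvRegular]
  by_cases h10 : u = "had".toList
  · subst h10
    simp [pvNegateLoop, pvAux, PySem.Chars.startswith, List.isPrefixOf, PySem.List.slice_from, pvRegular]
  by_cases h11 : u = "can".toList
  · subst h11
    simp [pvNegateLoop, pvAux, PySem.Chars.startswith, List.isPrefixOf, PySem.List.slice_from]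
  by_cases h12 : u = "could".toList
  · subst h12
    simp [pvNegateLoop, pvAux, PySem.Chars.startswith, List.isPrefixOf, PySem.List.slice_from, pvRegular]
  by_cases h13 : u = "will".toList
  · subst h13
    simp [pvNegateLoop, pvAux, PySem.Chars.startswith, List.isPrefixOf, PySem.List.slice_from, pvRegular]
  by_cases h14 : u = "would".toList
  · subst h14
    simp [pvNegateLoop, pvAux, PySem.Chars.startswith, List.isPrefixOf, PySem.List.slice_from, pvRegular]
  by_cases h15 : u = "should".toList
  · subst h15
    simp [pvNegateLoop, pvAux, PySem.Chars.startswith, List.isPrefixOf, PySem.List.slice_from, pvRegular]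
  by_cases h16 : u = "cannot".toList
  · subst h16
    simp [pvNegateLoop, pvAux, PySem.Chars.startswith, List.isPrefixOf, PySem.List.slice_from]
  -- u is none of the 16 key words: both sides return none
  have hloop : pvNegateLoop (u ++ ' ' :: r) pvAux = none := by
    apply pvLoopNone
    intro pn hpn
    fin_cases hpn
    exacts [⟨pvSwFalse u r "is".toList [] hu (by decide) (Ne.symm h1), pvSwFalse u r "is".toList "not ".toList hu (by decide) (Ne.symm h1)⟩,
      ⟨pvSwFalse u r "are".toList [] hu (by decide) (Ne.symm h2), pvSwFalse u r "are".toList "not ".toList hu (by decide) (Ne.symm h2)⟩,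
      ⟨pvSwFalse u r "was".toList [] hu (by decide) (Ne.symm h3), pvSwFalse u r "was".toList "not ".toList hu (by decide) (Ne.symm h3)⟩,
      ⟨pvSwFalse u r "were".toList [] hu (by decide) (Ne.symm h4), pvSwFalse u r "were".toList "not ".toList hu (by decide) (Ne.symm h4)⟩,
      ⟨pvSwFalse u r "does".toList [] hu (by decide) (Ne.symm h5), pvSwFalse u r "does".toList "not ".toList hu (by decide) (Ne.symm h5)⟩,
      ⟨pvSwFalse u r "do".toList [] hu (by decide) (Ne.symm h6), pvSwFalse u r "do".toList "not ".toList hu (by decide) (Ne.symm h6)⟩,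
      ⟨pvSwFalse u r "did".toList [] hu (by decide) (Ne.symm h7), pvSwFalse u r "did".toList "not ".toList hu (by decide) (Ne.symm h7)⟩,
      ⟨pvSwFalse u r "has".toList [] hu (by decide) (Ne.symm h8), pvSwFalse u r "has".toList "not ".toList hu (by decide) (Ne.symm h8)⟩,
      ⟨pvSwFalse u r "have".toList [] hu (by decide) (Ne.symm h9), pvSwFalse u r "have".toList "not ".toList hu (by decide) (Ne.symm h9)⟩,
      ⟨pvSwFalse u r "had".toList [] hu (by decide) (Ne.symm h10), pvSwFalse u r "had".toList "not ".toList hu (by decide) (Ne.symm h10)⟩,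
      ⟨pvSwFalse u r "can".toList [] hu (by decide) (Ne.symm h11), pvSwFalse u r "cannot".toList "".toList hu (by decide) (Ne.symm h16)⟩,
      ⟨pvSwFalse u r "could".toList [] hu (by decide) (Ne.symm h12), pvSwFalse u r "could".toList "not ".toList hu (by decide) (Ne.symm h12)⟩,
      ⟨pvSwFalse u r "will".toList [] hu (by decide) (Ne.symm h13), pvSwFalse u r "will".toList "not ".toList hu (by decide) (Ne.symm h13)⟩,
      ⟨pvSwFalse u r "would".toList [] hu (by decide) (Ne.symm h14), pvSwFalse u r "would".toList "not ".toList hu (by decide) (Ne.symm h14)⟩,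
      ⟨pvSwFalse u r "should".toList [] hu (by decide) (Ne.symm h15), pvSwFalse u r "should".toList "not ".toList hu (by decide) (Ne.symm h15)⟩]
  have hmem : ¬ (PySem.Set.contains pvRegular u = true) := by
    rw [PySem.Set.contains_iff]
    intro hm
    simp only [pvRegular, PySem.Set.mem_ofList, List.mem_cons, List.not_mem_nil, or_false] at hm
    rcases hm with h|h|h|h|h|h|h|h|h|h|h|h|h|h
    exacts [h1 h, h2 h, h3 h, h4 h, h5 h, h6 h, h7 h, h8 h, h9 h, h10 h, h12 h, h13 h, h14 h, h15 h]
  rw [hloop, if_neg h16, if_neg h11, if_pos hmem]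

-- ===== VERDICT (by name: the statement is the Claim_ definition above) =====
theorem negate_question_spec : Claim_equal_negate_question := by
  intro q _
  unfold Spec_negate_question negate_question negate_question_alt
  rw [pvCore]
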